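-- pv_equiv track=rewrite | github.com/aswin-setiadi/belajar | hackerrank/medium_magic_square.py | generate_magics
-- ===== SOURCE A (Python) =====
-- def generate_magics(n=3):
--     def _generate_rotates(ms, m, count):
--         if not count:
--             return
--         else:
--             rotated = [[] for _ in range(n)]
--             for v1 in m:
--                 for k2, v2 in enumerate(v1[::-1]):
--                     rotated[k2].append(v2)
--             ms.append(rotated)
--             _generate_rotates(ms, rotated, count - 1)
--
--     a = [[8, 3, 4], [1, 5, 9], [6, 7, 2]]
--     magics = [a]
--     _generate_rotates(magics, a, 3)
--
--     a_t = [[] for _ in range(n)]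
--     for k1, v1 in enumerate(a):
--         for k2, v2 in enumerate(v1):
--             a_t[k2].append(v2)
--     magics.append(a_t)
--     _generate_rotates(magics, a_t, 3)
--     return magics
-- ===== SOURCE B (Python) =====
-- def generate_magics(n=3):
--     # The 8 symmetries of the 3x3 magic square: start from the base square and from
--     # its mirror-rotation (= transpose), and take three successive quarter-turns of each.
--     def rotate(m):
--         rotated = [[] for _ in range(n)]
--         for row in m:
--             for k, v in enumerate(row):
--                 rotated[len(row) - 1 - k].append(v)
--         return rotated
--
--     a = [[8, 3, 4], [1, 5, 9], [6, 7, 2]]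
--     magics = []
--     for start in (a, rotate([row[::-1] for row in a])):
--         magics.append(start)
--         cur = start
--         for _ in range(3):
--             cur = rotate(cur)
--             magics.append(cur)
--     return magics
-- ===== Notes on version B (the rewrite author's own statement) =====
-- stated objective: simpler
-- what changed: Replaces A's recursive _generate_rotates plus a separate manual transpose loop with a single iterative loop over the two starting squares (the base square and its mirror-rotation, which is the transpose), taking three quarter-turns of each; the rotate step places elements by index arithmetic instead of enumerating the reversed row. Pre_ excludes n < 3, where A (and B) raise IndexError on the undersized row preallocation.
import Mathlib
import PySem

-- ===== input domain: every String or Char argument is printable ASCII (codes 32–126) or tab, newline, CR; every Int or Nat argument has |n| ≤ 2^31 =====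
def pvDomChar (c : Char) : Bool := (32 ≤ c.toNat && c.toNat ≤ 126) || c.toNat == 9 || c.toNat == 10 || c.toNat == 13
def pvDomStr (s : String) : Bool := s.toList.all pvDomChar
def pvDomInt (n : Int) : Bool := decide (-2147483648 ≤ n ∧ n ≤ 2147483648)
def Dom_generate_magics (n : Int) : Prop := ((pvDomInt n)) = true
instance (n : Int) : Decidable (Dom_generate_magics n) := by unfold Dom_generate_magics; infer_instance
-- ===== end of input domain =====

-- B replaces A's recursive rotate-generator plus separate manual transpose with one loop over the
-- two starting squares (the base square and its mirror-rotation), three quarter-turns each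
-- (objective: simpler).

-- ===== PORT A =====
-- rotated[k2].append(v2): Python raises IndexError when k2 is out of range; Pre_ (3 ≤ n) keeps
-- every index in range, so the total forms pySetD/pyGetD are exact there.
def appendAt (xs : List (List Int)) (k : Int) (v : Int) : List (List Int) :=
  PySem.List.pySetD xs k (PySem.List.pyGetD xs k [] ++ [v])

-- rotated = [[] for _ in range(n)]; for v1 in m: for k2, v2 in enumerate(v1[::-1]): rotated[k2].append(v2)
-- (v1[::-1] via slice?, which is none only for step 0, so .getD [] is exact)
def rotateA (n : Int) (m : List (List Int)) : List (List Int) :=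
  m.foldl (fun rot v1 =>
      (PySem.List.enumerate ((PySem.List.slice? v1 none none (-1)).getD []) 0).foldl
        (fun rot kv => appendAt rot kv.1 kv.2) rot)
    (List.replicate n.toNat [])

def genRotates (n : Int) (ms : List (List (List Int))) (m : List (List Int)) : Nat → List (List (List Int))
  | 0 => ms
  | Nat.succ c =>
      let rotated := rotateA n m
      genRotates n (ms ++ [rotated]) rotated c

def generate_magics (n : Int) : List (List (List Int)) :=
  let a : List (List Int) := [[8, 3, 4], [1, 5, 9], [6, 7, 2]]
  let magics := genRotates n [a] a 3
  -- a_t = [[] for _ in range(n)]; for k1, v1 in enumerate(a): for k2, v2 in enumerate(v1): a_t[k2].append(v2)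
  let a_t := (PySem.List.enumerate a 0).foldl (fun at_ kv =>
      (PySem.List.enumerate kv.2 0).foldl (fun at_ kv2 => appendAt at_ kv2.1 kv2.2) at_)
    (List.replicate n.toNat [])
  genRotates n (magics ++ [a_t]) a_t 3

-- ===== PORT B =====
-- rotated[len(row) - 1 - k].append(v) — total form exact under Pre_ (3 ≤ n), like appendAt above
def appendAtB (xs : List (List Int)) (k : Int) (v : Int) : List (List Int) :=
  PySem.List.pySetD xs k (PySem.List.pyGetD xs k [] ++ [v])

-- rotated = [[] for _ in range(n)]; for row in m: for k, v in enumerate(row): rotated[len(row)-1-k].append(v)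
def rotateB (n : Int) (m : List (List Int)) : List (List Int) :=
  m.foldl (fun rot row =>
      (PySem.List.enumerate row 0).foldl
        (fun rot kv => appendAtB rot ((row.length : Int) - 1 - kv.1) kv.2) rot)
    (List.replicate n.toNat [])

-- for start in (a, rotate([row[::-1] for row in a])): append start; three rotations of it
def generate_magics_alt (n : Int) : List (List (List Int)) :=
  let a : List (List Int) := [[8, 3, 4], [1, 5, 9], [6, 7, 2]]
  let mirrored := a.map (fun row => ((PySem.List.slice? row none none (-1)).getD []))
  [a, rotateB n mirrored].foldl
    (fun magics start =>
      ((List.range 3).foldl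
        (fun (p : List (List (List Int)) × List (List Int)) _ =>
          let c := rotateB n p.2
          (p.1 ++ [c], c))
        (magics ++ [start], start)).1)
    []

-- ===== PRECONDITION & SPEC =====
-- For n < 3 the Python A raises IndexError (rotated[k2] with k2 up to 2 but only n preallocated rows).
def Pre_generate_magics (n : Int) : Prop := 3 ≤ n
instance (n : Int) : Decidable (Pre_generate_magics n) := by unfold Pre_generate_magics; infer_instance
def pvWitness_generate_magics : Int := (3)

def Spec_generate_magics (n : Int) (out : List (List (List Int))) : Prop := out = generate_magics_alt n
instance (n : Int) (out : List (List (List Int))) : Decidable (Spec_generate_magics n out) := by unfold Spec_generate_magics; infer_instance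

-- ===== CLAIM (what is proved, stated in full; the proofs are below) =====
def Claim_equal_generate_magics : Prop := ∀ (n : Int), Dom_generate_magics n → Pre_generate_magics n → Spec_generate_magics n (generate_magics n)

-- ===== LEMMAS AND PROOFS =====

-- appendAt / appendAtB at the three in-range indices, on a list with ≥ 3 rows
lemma appendAt_0 (l0 l1 l2 : List Int) (R : List (List Int)) (v : Int) :
    appendAt (l0::l1::l2::R) 0 v = (l0++[v])::l1::l2::R := by
  have h : (0:Int) = ((0:Nat):Int) := by norm_num
  rw [appendAt, h, PySem.List.pySetD_natCast, PySem.List.pyGetD_natCast]; rfl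

lemma appendAt_1 (l0 l1 l2 : List Int) (R : List (List Int)) (v : Int) (i : Int) (hi : i = 1) :
    appendAt (l0::l1::l2::R) i v = l0::(l1++[v])::l2::R := by
  have h : i = ((1:Nat):Int) := by omega
  rw [appendAt, h, PySem.List.pySetD_natCast, PySem.List.pyGetD_natCast]; rfl

lemma appendAt_2 (l0 l1 l2 : List Int) (R : List (List Int)) (v : Int) (i : Int) (hi : i = 2) :
    appendAt (l0::l1::l2::R) i v = l0::l1::(l2++[v])::R := by
  have h : i = ((2:Nat):Int) := by omega
  rw [appendAt, h, PySem.List.pySetD_natCast, PySem.List.pyGetD_natCast]; rfl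

lemma appendAtB_0 (l0 l1 l2 : List Int) (R : List (List Int)) (v : Int) (i : Int) (hi : i = 0) :
    appendAtB (l0::l1::l2::R) i v = (l0++[v])::l1::l2::R := by
  have h : i = ((0:Nat):Int) := by omega
  rw [appendAtB, h, PySem.List.pySetD_natCast, PySem.List.pyGetD_natCast]; rfl

lemma appendAtB_1 (l0 l1 l2 : List Int) (R : List (List Int)) (v : Int) (i : Int) (hi : i = 1) :
    appendAtB (l0::l1::l2::R) i v = l0::(l1++[v])::l2::R := by
  have h : i = ((1:Nat):Int) := by omega
  rw [appendAtB, h, PySem.List.pySetD_natCast, PySem.List.pyGetD_natCast]; rfl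

lemma appendAtB_2 (l0 l1 l2 : List Int) (R : List (List Int)) (v : Int) (i : Int) (hi : i = 2) :
    appendAtB (l0::l1::l2::R) i v = l0::l1::(l2++[v])::R := by
  have h : i = ((2:Nat):Int) := by omega
  rw [appendAtB, h, PySem.List.pySetD_natCast, PySem.List.pyGetD_natCast]; rfl

-- the n.toNat preallocated rows split into the 3 the core fills plus the (n-3).toNat pad
lemma replicate_toNat_split (n : Int) (h : 3 ≤ n) :
    List.replicate n.toNat ([] : List Int) =
      [] :: [] :: [] :: List.replicate (n - 3).toNat [] := by
  have hn : n.toNat = (n - 3).toNat + 3 := by omega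
  rw [hn]; rfl

-- the inner double loop of rotateA does nothing on the empty pad rows
lemma foldl_pad_idA (j : Nat) (acc : List (List Int)) :
    (List.replicate j ([] : List Int)).foldl (fun rot v1 =>
      (PySem.List.enumerate ((PySem.List.slice? v1 none none (-1)).getD []) 0).foldl
        (fun rot kv => appendAt rot kv.1 kv.2) rot) acc = acc := by
  induction j generalizing acc with
  | zero => rfl
  | succ j ih => rw [List.replicate_succ, List.foldl_cons]; exact ih acc

-- the inner double loop of rotateB does nothing on the empty pad rows
lemma foldl_pad_idB (j : Nat) (acc : List (List Int)) :
    (List.replicate j ([] : List Int)).foldl (fun rot row =>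
      (PySem.List.enumerate row 0).foldl
        (fun rot kv => appendAtB rot ((row.length : Int) - 1 - kv.1) kv.2) rot) acc = acc := by
  induction j generalizing acc with
  | zero => rfl
  | succ j ih => rw [List.replicate_succ, List.foldl_cons]; exact ih acc

-- one rotate step of A on a core-plus-pad matrix: counterclockwise rotation of the core, repadded
lemma rotateA_eq (n : Int) (h : 3 ≤ n) (p q r s t u v w x : Int) (j : Nat) :
    rotateA n ([[p, q, r], [s, t, u], [v, w, x]] ++ List.replicate j []) =
      [[r, u, x], [q, t, w], [p, s, v]] ++ List.replicate (n - 3).toNat [] := by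
  unfold rotateA
  rw [List.foldl_append, replicate_toNat_split n h, foldl_pad_idA]
  simp only [List.foldl_cons, List.foldl_nil, PySem.List.slice?_none_none_neg_one,
    Option.getD_some, List.reverse_cons, List.reverse_nil, List.nil_append, List.cons_append,
    PySem.List.enumerate_cons, PySem.List.enumerate_nil]
  rw [appendAt_0, appendAt_1 _ _ _ _ _ _ (by norm_num), appendAt_2 _ _ _ _ _ _ (by norm_num),
    appendAt_0, appendAt_1 _ _ _ _ _ _ (by norm_num), appendAt_2 _ _ _ _ _ _ (by norm_num),
    appendAt_0, appendAt_1 _ _ _ _ _ _ (by norm_num), appendAt_2 _ _ _ _ _ _ (by norm_num)]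
  simp only [List.cons_append, List.nil_append]

-- one rotate step of B on a core-plus-pad matrix: the same counterclockwise rotation
lemma rotateB_eq (n : Int) (h : 3 ≤ n) (p q r s t u v w x : Int) (j : Nat) :
    rotateB n ([[p, q, r], [s, t, u], [v, w, x]] ++ List.replicate j []) =
      [[r, u, x], [q, t, w], [p, s, v]] ++ List.replicate (n - 3).toNat [] := by
  unfold rotateB
  rw [List.foldl_append, replicate_toNat_split n h, foldl_pad_idB]
  simp only [List.foldl_cons, List.foldl_nil, PySem.List.enumerate_cons,
    PySem.List.enumerate_nil, List.length_cons, List.length_nil]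
  rw [appendAtB_2 _ _ _ _ _ _ (by norm_num), appendAtB_1 _ _ _ _ _ _ (by norm_num),
    appendAtB_0 _ _ _ _ _ _ (by norm_num),
    appendAtB_2 _ _ _ _ _ _ (by norm_num), appendAtB_1 _ _ _ _ _ _ (by norm_num),
    appendAtB_0 _ _ _ _ _ _ (by norm_num),
    appendAtB_2 _ _ _ _ _ _ (by norm_num), appendAtB_1 _ _ _ _ _ _ (by norm_num),
    appendAtB_0 _ _ _ _ _ _ (by norm_num)]
  simp only [List.cons_append, List.nil_append]

-- the transpose loop of A on the concrete base square
lemma transposeA_eq (n : Int) (h : 3 ≤ n) :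
    (PySem.List.enumerate ([[8, 3, 4], [1, 5, 9], [6, 7, 2]] : List (List Int)) 0).foldl
      (fun at_ kv => (PySem.List.enumerate kv.2 0).foldl
        (fun at_ kv2 => appendAt at_ kv2.1 kv2.2) at_)
      (List.replicate n.toNat []) =
      [[8, 1, 6], [3, 5, 7], [4, 9, 2]] ++ List.replicate (n - 3).toNat [] := by
  rw [replicate_toNat_split n h]
  simp only [PySem.List.enumerate_cons, PySem.List.enumerate_nil, List.foldl_cons, List.foldl_nil]
  rw [appendAt_0, appendAt_1 _ _ _ _ _ _ (by norm_num), appendAt_2 _ _ _ _ _ _ (by norm_num),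
    appendAt_0, appendAt_1 _ _ _ _ _ _ (by norm_num), appendAt_2 _ _ _ _ _ _ (by norm_num),
    appendAt_0, appendAt_1 _ _ _ _ _ _ (by norm_num), appendAt_2 _ _ _ _ _ _ (by norm_num)]
  simp only [List.cons_append, List.nil_append]

-- rotateB of the mirrored base square (the transpose start of B), with hypothesis j = 0 core shape
lemma rotateB_mirror (n : Int) (h : 3 ≤ n) :
    rotateB n [[4, 3, 8], [9, 5, 1], [2, 7, 6]] =
      [[8, 1, 6], [3, 5, 7], [4, 9, 2]] ++ List.replicate (n - 3).toNat [] := by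
  have := rotateB_eq n h 4 3 8 9 5 1 2 7 6 0
  simpa using this

-- genRotates with count 3, written out
lemma genRotates3 (n : Int) (ms : List (List (List Int))) (m : List (List Int)) :
    genRotates n ms m 3 =
      ms ++ [rotateA n m] ++ [rotateA n (rotateA n m)]
         ++ [rotateA n (rotateA n (rotateA n m))] := rfl

-- ===== VERDICT (by name: the statement is the Claim_ definition above) =====
theorem generate_magics_spec : Claim_equal_generate_magics := by
  intro n _ hpre
  unfold Spec_generate_magics
  have h0 : rotateA n [[8, 3, 4], [1, 5, 9], [6, 7, 2]] =
      [[4, 9, 2], [3, 5, 7], [8, 1, 6]] ++ List.replicate (n - 3).toNat [] := by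
    simpa using rotateA_eq n hpre 8 3 4 1 5 9 6 7 2 0
  have h0' : rotateB n [[8, 3, 4], [1, 5, 9], [6, 7, 2]] =
      [[4, 9, 2], [3, 5, 7], [8, 1, 6]] ++ List.replicate (n - 3).toNat [] := by
    simpa using rotateB_eq n hpre 8 3 4 1 5 9 6 7 2 0
  have h1 := rotateA_eq n hpre 4 9 2 3 5 7 8 1 6 (n - 3).toNat
  have h2 := rotateA_eq n hpre 2 7 6 9 5 1 4 3 8 (n - 3).toNat
  have ht := rotateA_eq n hpre 8 1 6 3 5 7 4 9 2 (n - 3).toNat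
  have ht1 := rotateA_eq n hpre 6 7 2 1 5 9 8 3 4 (n - 3).toNat
  have ht2 := rotateA_eq n hpre 2 9 4 7 5 3 6 1 8 (n - 3).toNat
  have hb1 := rotateB_eq n hpre 4 9 2 3 5 7 8 1 6 (n - 3).toNat
  have hb2 := rotateB_eq n hpre 2 7 6 9 5 1 4 3 8 (n - 3).toNat
  have hbt := rotateB_eq n hpre 8 1 6 3 5 7 4 9 2 (n - 3).toNat
  have hbt1 := rotateB_eq n hpre 6 7 2 1 5 9 8 3 4 (n - 3).toNat
  have hbt2 := rotateB_eq n hpre 2 9 4 7 5 3 6 1 8 (n - 3).toNat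
  show generate_magics n = generate_magics_alt n
  rw [generate_magics, genRotates3, genRotates3, transposeA_eq n hpre, h0, h1, h2, ht, ht1, ht2]
  rw [generate_magics_alt]
  simp only [List.map_cons, List.map_nil, PySem.List.slice?_none_none_neg_one, Option.getD_some,
    List.reverse_cons, List.reverse_nil, List.nil_append, List.cons_append]
  rw [rotateB_mirror n hpre]
  have hr : List.range 3 = [0, 1, 2] := rfl
  rw [hr]
  simp only [List.foldl_cons, List.foldl_nil, List.nil_append]
  rw [h0', hb1, hb2, hbt, hbt1, hbt2]
  simp
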